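-- pv_equiv track=rewrite | github.com/ZckFreedom/Mathworks | db_sqence/k_ary_dB.py | r_set
-- ===== SOURCE A (Python) =====
-- def if_nk(sequence_list, ary):
-- 	if len(sequence_list) == 0:
-- 		return False
-- 	n = len(sequence_list)
-- 	degree = ary ** (n-1)
-- 	value1 = 0
-- 	for i in range(n):
-- 		value1 += sequence_list[i] * (ary ** (n-i-1))
-- 	a1 = value1//degree
-- 	value2 = (ary * value1 + a1) % (ary ** n)
-- 	while value2 != value1:
-- 		if value2 < value1:
-- 			return False
-- 		a1 = value2 // degree
-- 		value2 = (ary * value2 + a1) % (ary ** n)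
-- 	return True
--
-- def r_set(sequence, ary):
-- 	if sequence[0] + sequence[1] != 0:
-- 		return []
-- 	t = ary-1
-- 	new_state = sequence[1:] + [t]
-- 	r_list = []
-- 	if not if_nk(new_state, ary):
-- 		return []
-- 	r_list.append(t)
-- 	while t > 1:
-- 		t = t-1
-- 		new_state = sequence[1:] + [t]
-- 		if if_nk(new_state, ary):
-- 			r_list.append(t)
-- 		else:
-- 			r_list.reverse()
-- 			return r_list
-- 	r_list.reverse()
-- 	return r_list
-- ===== SOURCE B (Python) =====
-- def _is_necklace(word):
--     # True iff word is lexicographically <= all of its rotations (and nonempty)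
--     if not word:
--         return False
--     n = len(word)
--     for i in range(1, n):
--         if word[i:] + word[:i] < word:
--             return False
--     return True
--
-- def r_set(sequence, ary):
--     if sequence[0] + sequence[1] != 0:
--         return []
--     suffix = sequence[1:]
--     candidates = [ary - 1] + list(range(ary - 2, 0, -1))
--     kept = []
--     for t in candidates:
--         if not _is_necklace(suffix + [t]):
--             break
--         kept.append(t)
--     kept.reverse()
--     return kept
-- ===== Notes on version B (the rewrite author's own statement) =====
-- stated objective: alternative
-- what changed: The necklace test if_nk (integer-encoded word, modular rotation map ary*v+v//degree mod ary**n with an early-stopping while loop) is replaced by a direct lexicographic comparison of the word against each of its list rotations, and r_set's counting while-loop with early return is replaced by a take-while scan over the explicit candidate list [ary-1, ary-2, ..., 1].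
-- outside the precondition, e.g. on r_set([0, 0, 9], 2): A returns [], B returns [1]
import Mathlib
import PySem

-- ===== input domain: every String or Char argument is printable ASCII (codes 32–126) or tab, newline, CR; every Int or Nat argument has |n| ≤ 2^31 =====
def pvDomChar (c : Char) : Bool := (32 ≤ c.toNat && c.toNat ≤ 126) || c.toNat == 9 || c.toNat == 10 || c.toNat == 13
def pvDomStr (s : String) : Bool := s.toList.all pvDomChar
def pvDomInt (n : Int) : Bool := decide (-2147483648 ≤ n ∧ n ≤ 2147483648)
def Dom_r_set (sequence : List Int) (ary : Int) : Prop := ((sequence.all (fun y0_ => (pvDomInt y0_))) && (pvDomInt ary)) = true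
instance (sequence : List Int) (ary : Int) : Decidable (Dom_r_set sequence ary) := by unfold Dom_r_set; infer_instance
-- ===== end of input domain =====

-- B replaces the integer-encoded modular-rotation necklace test and the counting while-loop
-- by a direct lexicographic comparison with list rotations and a take-while scan (objective: alternative).

-- ===== PORT A =====
-- while value2 != value1: … ; fuel = word length suffices inside Pre_ (the loop walks the ≤ n rotations);
-- outside Pre_ the Python loop may diverge or raise, nothing is claimed there.
def if_nk_loop (ary degree modn value1 : Int) : Nat → Int → Bool
  | 0, _ => true
  | fuel+1, value2 =>
    if value2 = value1 then true
    else if value2 < value1 then false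
    else if_nk_loop ary degree modn value1 fuel
      (PySem.Int.mod (ary * value2 + PySem.Int.floordiv value2 degree) modn)

-- exponents n-1 and n-i-1 are ≥ 0 wherever Python reaches them, so .toNat is exact
def if_nk (sequence_list : List Int) (ary : Int) : Bool :=
  if sequence_list.length = 0 then false
  else
    let n : Int := sequence_list.length
    let degree : Int := ary ^ (n - 1).toNat
    let value1 : Int := (PySem.List.pyRange 0 n 1).foldl
      (fun acc i => acc + PySem.List.pyGetD sequence_list i 0 * ary ^ (n - i - 1).toNat) 0
    let value2 : Int := PySem.Int.mod (ary * value1 + PySem.Int.floordiv value1 degree) (ary ^ n.toNat)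
    if_nk_loop ary degree (ary ^ n.toNat) value1 sequence_list.length value2

-- while t > 1: … ; fuel = (t-1).toNat is the exact iteration count (t drops by 1 each pass)
def tLoopA (seq1 : List Int) (ary : Int) : Nat → Int → List Int → List Int
  | 0, _, r_list => r_list.reverse
  | fuel+1, t, r_list =>
    if t > 1 then
      let t' := t - 1
      let new_state := seq1 ++ [t']
      if if_nk new_state ary then tLoopA seq1 ary fuel t' (r_list ++ [t'])
      else r_list.reverse
    else r_list.reverse

def r_set (sequence : List Int) (ary : Int) : List Int :=
  match PySem.List.pyGet? sequence 0, PySem.List.pyGet? sequence 1 with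
  | some s0, some s1 =>
    if s0 + s1 ≠ 0 then []
    else
      let t := ary - 1
      let seq1 := PySem.List.slice sequence (some 1) none
      let new_state := seq1 ++ [t]
      if ¬ if_nk new_state ary then []
      else tLoopA seq1 ary (t - 1).toNat t [t]
  | _, _ => []   -- sequence[0] / sequence[1]: Python raises IndexError; excluded by Pre_

-- ===== PORT B =====
-- Python list '<' on int lists: lexicographic
def lexLt : List Int → List Int → Bool
  | [], [] => false
  | [], _ :: _ => true
  | _ :: _, [] => false
  | a :: as, b :: bs => if a < b then true else if b < a then false else lexLt as bs

def is_necklace (word : List Int) : Bool :=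
  if word.isEmpty then false
  else (PySem.List.pyRange 1 word.length 1).all (fun i =>
    ! lexLt (PySem.List.slice word (some i) none ++ PySem.List.slice word none (some i)) word)

def alt_loop (suffix : List Int) : List Int → List Int → List Int
  | [], kept => kept.reverse
  | t :: rest, kept =>
    if ¬ is_necklace (suffix ++ [t]) then kept.reverse
    else alt_loop suffix rest (kept ++ [t])

def r_set_alt (sequence : List Int) (ary : Int) : List Int :=
  -- sequence[0] / sequence[1] raise IndexError on short input (excluded by Pre_): Option.elim keeps B total
  (PySem.List.pyGet? sequence 0).elim [] fun s0 =>
    (PySem.List.pyGet? sequence 1).elim [] fun s1 =>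
      if s0 + s1 ≠ 0 then []
      else
        let suffix := PySem.List.slice sequence (some 1) none
        let candidates := (ary - 1) :: PySem.List.pyRange (ary - 2) 0 (-1)
        alt_loop suffix candidates []

-- ===== PRECONDITION & SPEC =====
-- Pre_ excludes: lists of length < 2 (A raises IndexError), and — when sequence[0]+sequence[1] = 0,
-- so that the necklace machinery actually runs — inputs whose rotated state is not a k-ary word
-- (ary < 1 or a tail entry outside 0..ary-1): there A divides by zero (ary = 0), diverges
-- (e.g. [1,-1] with ary = 2), or returns [] by an accident of the encoding (e.g. [0,0,9] with ary = 2).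
def Pre_r_set (sequence : List Int) (ary : Int) : Prop :=
  2 ≤ sequence.length ∧
  (sequence.headI + (sequence.drop 1).headI = 0 →
    1 ≤ ary ∧ ∀ x ∈ sequence.drop 1, 0 ≤ x ∧ x < ary)
instance (sequence : List Int) (ary : Int) : Decidable (Pre_r_set sequence ary) := by
  unfold Pre_r_set; infer_instance

def pvWitness_r_set : List Int × Int := ([0, 0, 1], 2)

def Spec_r_set (sequence : List Int) (ary : Int) (out : List Int) : Prop := out = r_set_alt sequence ary
instance (sequence : List Int) (ary : Int) (out : List Int) : Decidable (Spec_r_set sequence ary out) := by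
  unfold Spec_r_set; infer_instance

-- ===== CLAIM (what is proved, stated in full; the proofs are below) =====
def Claim_equal_r_set : Prop := ∀ (sequence : List Int) (ary : Int), Dom_r_set sequence ary → Pre_r_set sequence ary → Spec_r_set sequence ary (r_set sequence ary)

-- ===== LEMMAS AND PROOFS =====

-- Horner encoding of a word in base ary, rotations, digit words
def encA (ary : Int) (w : List Int) : Int := w.foldl (fun a d => a * ary + d) 0
def rotA (k : Nat) (w : List Int) : List Int := w.drop k ++ w.take k
def DigitsA (ary : Int) (w : List Int) : Prop := ∀ x ∈ w, 0 ≤ x ∧ x < ary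

lemma foldl_shift (ary a : Int) (w : List Int) :
    w.foldl (fun a d => a * ary + d) a = a * ary ^ w.length + encA ary w := by
  induction w generalizing a with
  | nil => simp [encA]
  | cons x xs ih =>
    have hx : encA ary (x :: xs) = x * ary ^ xs.length + encA ary xs := by
      simpa [encA] using ih x
    simp only [List.foldl_cons]
    rw [ih (a * ary + x), hx, List.length_cons]
    ring

lemma enc_cons (ary x : Int) (xs : List Int) :
    encA ary (x :: xs) = x * ary ^ xs.length + encA ary xs := by
  simpa [encA] using foldl_shift ary x xs

lemma enc_append_singleton (ary x : Int) (xs : List Int) :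
    encA ary (xs ++ [x]) = encA ary xs * ary + x := by
  simp [encA, List.foldl_append]

lemma enc_bounds (ary : Int) (hary : 1 ≤ ary) (w : List Int) (hd : DigitsA ary w) :
    0 ≤ encA ary w ∧ encA ary w < ary ^ w.length := by
  induction w with
  | nil => simp [encA]
  | cons x xs ih =>
    have hx := hd x (by simp)
    have hxs : DigitsA ary xs := fun y hy => hd y (by simp [hy])
    obtain ⟨h0, h1⟩ := ih hxs
    have hP : (0:Int) < ary ^ xs.length := pow_pos (by omega) _
    rw [enc_cons, List.length_cons, pow_succ]
    constructor
    · nlinarith [hx.1]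
    · nlinarith [hx.2]

lemma sumA_eq_enc (ary : Int) (w : List Int) :
    (PySem.List.pyRange 0 (w.length : Int) 1).foldl
      (fun acc i => acc + PySem.List.pyGetD w i 0 * ary ^ (((w.length : Int) - i - 1)).toNat) 0
    = encA ary w := by
  induction w using List.reverseRecOn with
  | nil => simp [encA]
  | append_singleton xs x ih =>
    have hlen : ((xs ++ [x]).length : Int) = (xs.length : Int) + 1 := by
      simp
    rw [hlen, PySem.List.pyRange_one_succ_right (by positivity)]
    rw [List.foldl_append]
    rw [PySem.List.foldl_add (PySem.List.pyRange 0 (xs.length : Int) 1) (fun i => PySem.List.pyGetD (xs ++ [x]) i 0 * ary ^ ((xs.length : Int) + 1 - i - 1).toNat) 0]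
    have hcong : (PySem.List.pyRange 0 (xs.length : Int) 1).map
        (fun i => PySem.List.pyGetD (xs ++ [x]) i 0 * ary ^ ((xs.length : Int) + 1 - i - 1).toNat)
        = (PySem.List.pyRange 0 (xs.length : Int) 1).map
        (fun i => (PySem.List.pyGetD xs i 0 * ary ^ ((xs.length : Int) - i - 1).toNat) * ary) := by
      apply List.map_congr_left
      intro i hi
      rw [PySem.List.mem_pyRange_one] at hi
      obtain ⟨hi0, hi1⟩ := hi
      have hnat : i = (i.toNat : Int) := by omega
      have hlt : i.toNat < xs.length := by omega
      rw [hnat, PySem.List.pyGetD_natCast, PySem.List.pyGetD_natCast]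
      rw [List.getD_append xs [x] 0 i.toNat hlt]
      have he : ((xs.length : Int) + 1 - (i.toNat : Int) - 1).toNat
          = ((xs.length : Int) - (i.toNat : Int) - 1).toNat + 1 := by omega
      rw [he, pow_succ]
      ring
    rw [hcong, List.sum_map_mul_right]
    have hsum : ((PySem.List.pyRange 0 (xs.length : Int) 1).map
        (fun i => PySem.List.pyGetD xs i 0 * ary ^ ((xs.length : Int) - i - 1).toNat)).sum
        = encA ary xs := by
      rw [← ih, PySem.List.foldl_add (PySem.List.pyRange 0 (xs.length : Int) 1) (fun i => PySem.List.pyGetD xs i 0 * ary ^ ((xs.length : Int) - i - 1).toNat) 0]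
      simp
    rw [hsum]
    simp only [List.foldl_cons, List.foldl_nil]
    have hget : PySem.List.pyGetD (xs ++ [x]) (xs.length : Int) 0 = x := by
      rw [PySem.List.pyGetD_natCast]
      simp [List.getD]
    rw [hget, enc_append_singleton]
    have : ((xs.length : Int) + 1 - (xs.length : Int) - 1).toNat = 0 := by omega
    rw [this]
    ring

lemma step_rot (ary : Int) (hary : 1 ≤ ary) (w : List Int) (hw : w ≠ []) (hd : DigitsA ary w) :
    PySem.Int.mod (ary * encA ary w + PySem.Int.floordiv (encA ary w) (ary ^ (w.length - 1)))
      (ary ^ w.length) = encA ary (rotA 1 w) := by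
  obtain ⟨h, rest, rfl⟩ : ∃ h rest, w = h :: rest := by
    cases w with
    | nil => exact absurd rfl hw
    | cons h rest => exact ⟨h, rest, rfl⟩
  have hh := hd h (by simp)
  have hrest : DigitsA ary rest := fun y hy => hd y (by simp [hy])
  obtain ⟨he0, he1⟩ := enc_bounds ary hary rest hrest
  have hP : (0:Int) < ary ^ rest.length := pow_pos (by omega) _
  have hlen : (h :: rest).length - 1 = rest.length := by simp
  have hcons := enc_cons ary h rest
  have hdiv : PySem.Int.floordiv (encA ary (h :: rest)) (ary ^ rest.length) = h := by
    rw [PySem.Int.floordiv_eq_iff_of_pos hP]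
    constructor
    · nlinarith
    · nlinarith
  rw [hlen, hdiv, hcons]
  have hrot : rotA 1 (h :: rest) = rest ++ [h] := by simp [rotA]
  rw [hrot, enc_append_singleton]
  have hlc : (h :: rest).length = rest.length + 1 := by simp
  rw [hlc, pow_succ]
  have hm : ary * (h * ary ^ rest.length + encA ary rest) + h
      = (encA ary rest * ary + h) + (ary ^ rest.length * ary) * h := by ring
  rw [hm]
  have hXlo : (0:Int) ≤ encA ary rest * ary + h := by nlinarith [hh.1]
  have hXhi : encA ary rest * ary + h < ary ^ rest.length * ary := by nlinarith [hh.2]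
  rw [PySem.Int.mod_eq_emod_of_pos (by positivity : (0:Int) < ary ^ rest.length * ary)]
  rw [Int.add_mul_emod_self_left]
  exact Int.emod_eq_of_lt hXlo hXhi

lemma enc_lt_iff (ary : Int) (hary : 1 ≤ ary) :
    ∀ (v w : List Int), v.length = w.length → DigitsA ary v → DigitsA ary w →
    (encA ary v < encA ary w ↔ lexLt v w = true) := by
  intro v
  induction v with
  | nil =>
    intro w hlen _ _
    have : w = [] := by cases w <;> simp_all
    subst this
    simp [encA, lexLt]
  | cons a as ih =>
    intro w hlen hdv hdw
    cases w with
    | nil => simp at hlen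
    | cons b bs =>
      have hm : as.length = bs.length := by simpa using hlen
      have ha := hdv a (by simp)
      have hb := hdw b (by simp)
      have hdas : DigitsA ary as := fun y hy => hdv y (by simp [hy])
      have hdbs : DigitsA ary bs := fun y hy => hdw y (by simp [hy])
      obtain ⟨he1l, he1r⟩ := enc_bounds ary hary as hdas
      obtain ⟨he2l, he2r⟩ := enc_bounds ary hary bs hdbs
      rw [enc_cons, enc_cons, hm]
      rcases lt_trichotomy a b with hab | hab | hab
      · have : encA ary as < ary ^ bs.length := by rw [← hm]; exact he1r
        constructor
        · intro _; simp [lexLt, hab]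
        · intro _; nlinarith
      · subst hab
        have : (a * ary ^ bs.length + encA ary as < a * ary ^ bs.length + encA ary bs)
            ↔ encA ary as < encA ary bs := by omega
        rw [this, ih bs hm hdas hdbs]
        simp [lexLt]
      · have hP : (0:Int) < ary ^ bs.length := pow_pos (by omega) _
        constructor
        · intro hlt
          exfalso
          have : encA ary as < ary ^ bs.length := by rw [← hm]; exact he1r
          nlinarith
        · intro hlex
          exfalso
          simp only [lexLt] at hlex
          rw [if_neg (by omega), if_pos hab] at hlex
          exact Bool.false_ne_true hlex

lemma enc_inj (ary : Int) (hary : 1 ≤ ary) :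
    ∀ (v w : List Int), v.length = w.length → DigitsA ary v → DigitsA ary w →
    encA ary v = encA ary w → v = w := by
  intro v
  induction v with
  | nil =>
    intro w hlen _ _ _
    cases w <;> simp_all
  | cons a as ih =>
    intro w hlen hdv hdw heq
    cases w with
    | nil => simp at hlen
    | cons b bs =>
      have hm : as.length = bs.length := by simpa using hlen
      have ha := hdv a (by simp)
      have hb := hdw b (by simp)
      have hdas : DigitsA ary as := fun y hy => hdv y (by simp [hy])
      have hdbs : DigitsA ary bs := fun y hy => hdw y (by simp [hy])
      obtain ⟨he1l, he1r⟩ := enc_bounds ary hary as hdas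
      obtain ⟨he2l, he2r⟩ := enc_bounds ary hary bs hdbs
      rw [enc_cons, enc_cons, hm] at heq
      have hP : (0:Int) < ary ^ bs.length := pow_pos (by omega) _
      have he1r' : encA ary as < ary ^ bs.length := by rw [← hm]; exact he1r
      have hab : a = b := by nlinarith
      subst hab
      have : encA ary as = encA ary bs := by omega
      rw [ih bs hm hdas hdbs this]

lemma rot_length (k : Nat) (w : List Int) : (rotA k w).length = w.length := by
  simp [rotA]
  omega

lemma rot_digits (ary : Int) (k : Nat) (w : List Int) (hd : DigitsA ary w) :
    DigitsA ary (rotA k w) := by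
  intro x hx
  rcases List.mem_append.1 hx with h | h
  · exact hd x (List.mem_of_mem_drop h)
  · exact hd x (List.mem_of_mem_take h)

lemma rot_full (w : List Int) : rotA w.length w = w := by
  simp [rotA]

lemma rot_add (a b : Nat) (w : List Int) (h : a + b ≤ w.length) :
    rotA b (rotA a w) = rotA (a + b) w := by
  have hb : b ≤ (w.drop a).length := by simp; omega
  simp only [rotA]
  rw [List.drop_append_of_le_length hb, List.take_append_of_le_length hb, List.drop_drop]
  rw [List.append_assoc, ← List.take_add]

lemma rot_one_rot (k : Nat) (w : List Int) (h : k < w.length) :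
    rotA 1 (rotA k w) = rotA (k + 1) w := by
  rw [rot_add k 1 w (by omega)]

lemma rot_mod (k : Nat) (w : List Int) (hk : 1 ≤ k) (hrot : rotA k w = w) :
    ∀ j, j ≤ w.length → rotA j w = rotA (j % k) w := by
  intro j
  induction j using Nat.strong_induction_on with
  | _ j ihj =>
    intro hj
    by_cases hjk : j < k
    · rw [Nat.mod_eq_of_lt hjk]
    · rw [not_lt] at hjk
      have hsum : k + (j - k) ≤ w.length := by omega
      have h1 : rotA (j - k) (rotA k w) = rotA (k + (j - k)) w := rot_add k (j - k) w hsum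
      rw [hrot] at h1
      have h2 : k + (j - k) = j := by omega
      rw [h2] at h1
      rw [← h1, ihj (j - k) (by omega) (by omega), Nat.mod_eq_sub_mod hjk]

lemma loop_lemma (ary : Int) (hary : 1 ≤ ary) (w : List Int) (hw : w ≠ []) (hd : DigitsA ary w) :
    ∀ (f k : Nat), 1 ≤ k → k ≤ w.length → f = w.length - k + 1 →
    (∀ j, 1 ≤ j → j < k → encA ary w < encA ary (rotA j w)) →
    (if_nk_loop ary (ary ^ (w.length - 1)) (ary ^ w.length) (encA ary w) f (encA ary (rotA k w)) = true
      ↔ ∀ j, 1 ≤ j → j < w.length → encA ary w ≤ encA ary (rotA j w)) := by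
  intro f
  induction f with
  | zero =>
    intro k hk hkn hf _
    omega
  | succ f ihf =>
    intro k hk hkn hf hist
    have hwpos : 0 < w.length := List.length_pos_iff.2 hw
    have hdk : DigitsA ary (rotA k w) := rot_digits ary k w hd
    have hlk : (rotA k w).length = w.length := rot_length k w
    simp only [if_nk_loop]
    by_cases hveq : encA ary (rotA k w) = encA ary w
    · rw [if_pos hveq]
      have hrotk : rotA k w = w := enc_inj ary hary _ _ hlk hdk hd hveq
      refine iff_of_true rfl ?_
      intro j hj1 hjn
      rw [rot_mod k w hk hrotk j (le_of_lt hjn)]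
      by_cases hj0 : j % k = 0
      · rw [hj0]
        simp [rotA]
      · exact le_of_lt (hist (j % k) (by omega) (Nat.mod_lt j (by omega)))
    · rw [if_neg hveq]
      have hkltn : k < w.length := by
        rcases Nat.lt_or_ge k w.length with h | h
        · exact h
        · exfalso
          have : k = w.length := by omega
          subst this
          rw [rot_full] at hveq
          exact hveq rfl
      by_cases hvlt : encA ary (rotA k w) < encA ary w
      · rw [if_pos hvlt]
        refine iff_of_false (by simp) ?_
        intro hall
        exact absurd (hall k hk hkltn) (not_le.2 hvlt)
      · rw [if_neg hvlt]
        have hrotne : rotA k w ≠ [] := by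
          intro hnil
          rw [← List.length_eq_zero_iff] at hnil
          omega
        have hstep := step_rot ary hary (rotA k w) hrotne hdk
        rw [hlk] at hstep
        rw [rot_one_rot k w hkltn] at hstep
        rw [hstep]
        exact ihf (k + 1) (by omega) (by omega) (by omega)
          (fun j hj1 hjk1 => by
            by_cases hjk : j < k
            · exact hist j hj1 hjk
            · have : j = k := by omega
              subst this
              omega)

lemma if_nk_iff (ary : Int) (hary : 1 ≤ ary) (w : List Int) (hw : w ≠ []) (hd : DigitsA ary w) :
    (if_nk w ary = true ↔ ∀ j, 1 ≤ j → j < w.length → encA ary w ≤ encA ary (rotA j w)) := by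
  have hwpos : 0 < w.length := List.length_pos_iff.2 hw
  unfold if_nk
  rw [if_neg (by omega)]
  simp only
  rw [sumA_eq_enc]
  have ht1 : (((w.length : Int)) - 1).toNat = w.length - 1 := by omega
  have ht2 : ((w.length : Int)).toNat = w.length := by omega
  rw [ht1, ht2]
  have hstep := step_rot ary hary w hw hd
  rw [hstep]
  exact loop_lemma ary hary w hw hd w.length 1 (by omega) (by omega) (by omega) (by omega)

lemma is_necklace_iff (w : List Int) (hw : w ≠ []) :
    (is_necklace w = true ↔ ∀ j, 1 ≤ j → j < w.length → lexLt (rotA j w) w = false) := by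
  unfold is_necklace
  rw [if_neg (by simp [List.isEmpty_iff, hw])]
  rw [List.all_eq_true]
  constructor
  · intro hall j hj1 hjn
    have hj : ((j : Int)) ∈ PySem.List.pyRange 1 (w.length : Int) 1 := by
      rw [PySem.List.mem_pyRange_one]
      omega
    have := hall _ hj
    rw [PySem.List.slice_from _ (by omega), PySem.List.slice_to _ (by omega)] at this
    simp only [Int.toNat_natCast] at this
    simpa [rotA] using this
  · intro hall i hi
    rw [PySem.List.mem_pyRange_one] at hi
    rw [PySem.List.slice_from _ (by omega), PySem.List.slice_to _ (by omega)]
    have := hall i.toNat (by omega) (by omega)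
    simpa [rotA] using this

lemma if_nk_eq_necklace (ary : Int) (hary : 1 ≤ ary) (w : List Int) (hw : w ≠ []) (hd : DigitsA ary w) :
    if_nk w ary = is_necklace w := by
  rw [Bool.eq_iff_iff, if_nk_iff ary hary w hw hd, is_necklace_iff w hw]
  constructor
  · intro hall j hj1 hjn
    have hle := hall j hj1 hjn
    have hiff := enc_lt_iff ary hary (rotA j w) w (rot_length j w) (rot_digits ary j w hd) hd
    rcases Bool.eq_false_or_eq_true (lexLt (rotA j w) w) with h | h
    · exfalso
      have := hiff.2 h
      omega
    · exact h
  · intro hall j hj1 hjn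
    have hfalse := hall j hj1 hjn
    have hiff := enc_lt_iff ary hary (rotA j w) w (rot_length j w) (rot_digits ary j w hd) hd
    by_contra hlt
    rw [not_le] at hlt
    have := hiff.1 hlt
    rw [hfalse] at this
    exact Bool.false_ne_true this

lemma loops_eq (suffix : List Int) (ary : Int) (hary : 1 ≤ ary)
    (hd : DigitsA ary suffix) :
    ∀ (t : Int) (r : List Int), 0 ≤ t → t ≤ ary - 1 →
    tLoopA suffix ary (t - 1).toNat t r = alt_loop suffix (PySem.List.pyRange (t - 1) 0 (-1)) r := by
  suffices h : ∀ (f : Nat) (t : Int) (r : List Int), 0 ≤ t → t ≤ ary - 1 → (t - 1).toNat = f →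
      tLoopA suffix ary f t r = alt_loop suffix (PySem.List.pyRange (t - 1) 0 (-1)) r by
    intro t r h0 h1
    exact h (t - 1).toNat t r h0 h1 rfl
  intro f
  induction f with
  | zero =>
    intro t r h0 h1 hf
    have ht : t ≤ 1 := by omega
    rw [PySem.List.pyRange_neg_one_eq_nil (by omega)]
    simp [tLoopA, alt_loop]
  | succ f ihf =>
    intro t r h0 h1 hf
    have ht : 2 ≤ t := by omega
    rw [PySem.List.pyRange_neg_one_cons (by omega)]
    simp only [tLoopA, alt_loop]
    rw [if_pos (by omega : t > 1)]
    have hdig : DigitsA ary (suffix ++ [t - 1]) := by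
      intro x hx
      rcases List.mem_append.1 hx with h | h
      · exact hd x h
      · simp at h
        omega
    rw [if_nk_eq_necklace ary hary (suffix ++ [t - 1]) (by simp) hdig]
    by_cases hneck : is_necklace (suffix ++ [t - 1]) = true
    · rw [if_pos hneck, if_neg (by simp [hneck])]
      have : t - 1 - 1 = t - 2 := by ring
      rw [ihf (t - 1) (r ++ [t - 1]) (by omega) (by omega) (by omega)]
    · rw [if_neg hneck, if_pos (by simp_all)]

-- ===== VERDICT (by name: the statement is the Claim_ definition above) =====
theorem r_set_spec : Claim_equal_r_set := by
  intro seq ary hdom hpre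
  obtain ⟨hlen, hsum⟩ := hpre
  unfold Spec_r_set
  cases seq with
  | nil => simp at hlen
  | cons s0 tl =>
    cases tl with
    | nil => simp at hlen
    | cons s1 rest =>
      have hg0 : PySem.List.pyGet? (s0 :: s1 :: rest) 0 = some s0 := by
        simp [PySem.List.pyGet?_zero_cons]
      have hg1 : PySem.List.pyGet? (s0 :: s1 :: rest) 1 = some s1 := by
        have h1 : (1 : Int) = ((0 : Int) + 1) := by norm_num
        rw [h1]
        have := PySem.List.pyGet?_cons_succ (x := s0) (xs := s1 :: rest) (n := 0)
        simp only [Int.natCast_zero] at this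
        rw [this, PySem.List.pyGet?_zero_cons]
      simp only [r_set, r_set_alt, hg0, hg1, Option.elim]
      by_cases hz : s0 + s1 = 0
      · have hcond : ¬ (s0 + s1 ≠ 0) := by omega
        simp only [if_neg hcond]
        obtain ⟨hary, hdig⟩ := hsum (by simpa using hz)
        have hsuf : PySem.List.slice (s0 :: s1 :: rest) (some 1) none = s1 :: rest := by
          rw [PySem.List.slice_from _ (by omega)]
          norm_num
        simp only [hsuf]
        have hdsuf : DigitsA ary (s1 :: rest) := by
          intro x hx
          exact hdig x (by simpa using hx)
        have hdw : DigitsA ary ((s1 :: rest) ++ [ary - 1]) := by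
          intro x hx
          rcases List.mem_append.1 hx with h | h
          · exact hdsuf x h
          · simp at h
            omega
        rw [if_nk_eq_necklace ary hary ((s1 :: rest) ++ [ary - 1]) (by simp) hdw]
        simp only [alt_loop]
        by_cases hneck : is_necklace ((s1 :: rest) ++ [ary - 1]) = true
        · simp only [if_neg (not_not_intro hneck), List.nil_append]
          rw [loops_eq (s1 :: rest) ary hary hdsuf (ary - 1) [ary - 1] (by omega) (by omega)]
          have h2 : ary - 1 - 1 = ary - 2 := by ring
          rw [h2]
        · simp only [if_pos hneck, List.reverse_nil]
      · simp only [if_pos (show s0 + s1 ≠ 0 from hz)]
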